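-- pv_equiv track=rewrite | github.com/Albert-learner/Algorithm | Programmers/LEVEL3/NumberGame.py | solution_other
-- ===== SOURCE A (Python) =====
-- def solution_other(A, B):
--     answer = 0
--
--     A.sort(reverse = True)
--     B.sort(reverse = True)
--
--     for num_A in A:
--         Min = num_A
--         for i in range(len(B)):
--             if Min < B[i]:
--                 Min = B[i]
--             else:
--                 break
--
--         if Min == num_A:
--             continue
--         else:
--             B.remove(Min)
--             answer += 1
--     return answer
-- ===== SOURCE B (Python) =====
-- def solution_other(A, B):
--     # Return-value equivalent re-implementation: sort both descending once,
--     # then a single two-pointer scan; pointer j consumes the largest remaining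
--     # B whenever it beats the current A.  (Like A, sorts A and B in place, but
--     # does not remove elements from B; equivalence is about the return value.)
--     A.sort(reverse=True)
--     B.sort(reverse=True)
--     j = 0
--     for a in A:
--         if j < len(B) and B[j] > a:
--             j += 1
--     return j
-- ===== Notes on version B (the rewrite author's own statement) =====
-- stated objective: faster
-- what changed: Replaces A's per-element inner scan over B plus B.remove (which shifts the list each win) with a single two-pointer pass over both descending-sorted lists, counting a win whenever the next-largest B beats the current A.
import Mathlib
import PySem

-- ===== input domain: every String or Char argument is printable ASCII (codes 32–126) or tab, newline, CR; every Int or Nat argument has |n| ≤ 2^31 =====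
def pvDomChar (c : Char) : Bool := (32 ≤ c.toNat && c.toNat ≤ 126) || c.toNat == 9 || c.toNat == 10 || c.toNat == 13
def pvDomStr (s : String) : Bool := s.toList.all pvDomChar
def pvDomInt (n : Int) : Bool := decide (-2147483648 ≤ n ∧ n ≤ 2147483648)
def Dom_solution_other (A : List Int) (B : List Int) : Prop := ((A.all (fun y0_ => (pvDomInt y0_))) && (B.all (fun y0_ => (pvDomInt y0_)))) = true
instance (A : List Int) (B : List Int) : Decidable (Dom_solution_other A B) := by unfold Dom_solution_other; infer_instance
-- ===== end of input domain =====

-- B changes the algorithm: A rescans and remove()s from B per element; B does one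
-- two-pointer pass over the two descending-sorted lists (return value only: like A it
-- sorts both arguments in place, but it does not remove elements from B).

-- ===== PORT A =====
-- inner 'for i in range(len(B)): if Min < B[i]: Min = B[i] else: break'
def aFindMin : List Int → Int → Int
  | [], m => m
  | b :: rest, m => if m < b then aFindMin rest b else m

-- one iteration of A's outer loop; state = (current B, answer).
-- The 'none' branch of remove? is where Python would raise ValueError; it is
-- unreachable (Min ≠ num_A forces Min ∈ B).
def aStep (st : List Int × Int) (numA : Int) : List Int × Int :=
  let M := aFindMin st.1 numA
  if M = numA then st
  else
    match PySem.List.remove? st.1 M with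
    | some B' => (B', st.2 + 1)
    | none => st

def solution_other (A : List Int) (B : List Int) : Int :=
  let As := PySem.List.sorted A (fun x => x) true
  let Bs := PySem.List.sorted B (fun x => x) true
  (As.foldl aStep (Bs, 0)).2

-- ===== PORT B =====
-- 'if j < len(B) and B[j] > a: j += 1'
def bStep (Bs : List Int) (j : Int) (a : Int) : Int :=
  if j < PySem.List.len Bs ∧ PySem.List.pyGetD Bs j 0 > a then j + 1 else j

def solution_other_alt (A : List Int) (B : List Int) : Int :=
  let As := PySem.List.sorted A (fun x => x) true
  let Bs := PySem.List.sorted B (fun x => x) true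
  As.foldl (bStep Bs) 0

-- ===== PRECONDITION & SPEC =====
def Spec_solution_other (A : List Int) (B : List Int) (out : Int) : Prop := out = solution_other_alt A B
instance (A : List Int) (B : List Int) (out : Int) : Decidable (Spec_solution_other A B out) := by unfold Spec_solution_other; infer_instance

-- ===== CLAIM (what is proved, stated in full; the proofs are below) =====
def Claim_equal_solution_other : Prop := ∀ (A : List Int) (B : List Int), Dom_solution_other A B → Spec_solution_other A B (solution_other A B)

-- ===== LEMMAS AND PROOFS =====

-- common reference function: two-pointer consumption as structural recursion
def go : List Int → List Int → Int
  | [], _ => 0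
  | _, [] => 0
  | a :: as, b :: bs => if b > a then 1 + go as bs else go as (b :: bs)

theorem go_nil_right (xs : List Int) : go xs [] = 0 := by
  cases xs <;> simp [go]

theorem aFindMin_of_forall_le (bs : List Int) (b : Int) (h : ∀ c ∈ bs, c ≤ b) :
    aFindMin bs b = b := by
  cases bs with
  | nil => simp [aFindMin]
  | cons c cs =>
    have : ¬ b < c := not_lt.mpr (h c (by simp))
    simp [aFindMin, this]

-- A's loop, on a descending B, counts exactly go
theorem foldl_aStep_eq (as : List Int) :
    ∀ (Bs : List Int) (n : Int), Bs.Pairwise (fun x y => y ≤ x) →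
      (as.foldl aStep (Bs, n)).2 = n + go as Bs := by
  induction as with
  | nil => intro Bs n _; simp [go]
  | cons a as ih =>
    intro Bs n hB
    cases Bs with
    | nil =>
      have : aStep ([], n) a = ([], n) := by simp [aStep, aFindMin]
      rw [List.foldl_cons, this, ih [] n List.Pairwise.nil, go_nil_right, go_nil_right]
    | cons b bs =>
      rcases List.pairwise_cons.mp hB with ⟨hhead, htail⟩
      by_cases hab : a < b
      · have hmin : aFindMin (b :: bs) a = b := by
          simp only [aFindMin, if_pos hab]
          exact aFindMin_of_forall_le bs b hhead
        have hstep : aStep (b :: bs, n) a = (bs, n + 1) := by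
          simp [aStep, hmin, (ne_of_gt hab : b ≠ a)]
        rw [List.foldl_cons, hstep, ih bs (n + 1) htail]
        simp [go, hab]
        ring
      · have hmin : aFindMin (b :: bs) a = a := by
          simp [aFindMin, hab]
        have hstep : aStep (b :: bs, n) a = (b :: bs, n) := by
          simp [aStep, hmin]
        rw [List.foldl_cons, hstep, ih (b :: bs) n hB]
        simp [go, hab]

-- B's loop, with pointer j into the fixed Bs, counts go on the suffix
theorem foldl_bStep_eq (Bs : List Int) (as : List Int) :
    ∀ (j : Nat), as.foldl (bStep Bs) (j : Int) = (j : Int) + go as (Bs.drop j) := by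
  induction as with
  | nil => intro j; simp [go]
  | cons a as ih =>
    intro j
    by_cases hj : j < Bs.length
    · have hdrop : Bs.drop j = Bs[j] :: Bs.drop (j + 1) :=
        List.drop_eq_getElem_cons hj
      have hget : PySem.List.pyGetD Bs (j : Int) 0 = Bs[j] := by
        rw [PySem.List.pyGetD_natCast]
        exact List.getD_eq_getElem Bs 0 hj
      by_cases hba : Bs[j] > a
      · have hcond : bStep Bs (j : Int) a = (j : Int) + 1 := by
          simp only [bStep, PySem.List.len_eq, hget]
          rw [if_pos ⟨by exact_mod_cast hj, hba⟩]
        have : ((j : Int) + 1) = ((j + 1 : Nat) : Int) := by push_cast; ring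
        rw [List.foldl_cons, hcond, this, ih (j + 1), hdrop]
        simp [go, hba]
        ring
      · have hcond : bStep Bs (j : Int) a = (j : Int) := by
          simp only [bStep, PySem.List.len_eq, hget]
          rw [if_neg (by tauto)]
        rw [List.foldl_cons, hcond, ih j, hdrop]
        simp [go, hba]
    · have hdrop : Bs.drop j = [] := List.drop_eq_nil_of_le (by omega)
      have hcond : bStep Bs (j : Int) a = (j : Int) := by
        simp only [bStep, PySem.List.len_eq]
        rw [if_neg]
        intro ⟨h1, _⟩
        exact hj (by exact_mod_cast h1)
      rw [List.foldl_cons, hcond, ih j, hdrop, go_nil_right, go_nil_right]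

-- ===== VERDICT (by name: the statement is the Claim_ definition above) =====
theorem solution_other_spec : Claim_equal_solution_other := by
  intro A B _
  unfold Spec_solution_other solution_other solution_other_alt
  have hpair : (PySem.List.sorted B (fun x => x) true).Pairwise (fun x y => y ≤ x) :=
    PySem.List.sorted_pairwise_rev B (fun x => x)
  rw [foldl_aStep_eq _ _ 0 hpair]
  have := foldl_bStep_eq (PySem.List.sorted B (fun x => x) true)
      (PySem.List.sorted A (fun x => x) true) 0
  simp at this ⊢
  rw [this]
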